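-- pv_equiv track=rewrite | github.com/wyk18703232953/myResearch | codeComplex/demo1/onlyCode/results/logn/results_python_logn_0127/generated_python_logn_0127.py | min_splitters
-- ===== SOURCE A (Python) =====
-- def sum_upto(num):
--     return (num * (num + 1)) // 2
--
-- def sum_from_to(fromm, to):
--     if fromm <= 1:
--         return sum_upto(to)
--     return sum_upto(to) - sum_upto(fromm)
--
-- def min_splitters(n, k):
--     start = 1
--     end = k
--     while start < end:
--         mid = (start + end) // 2
--         mid_val = sum_from_to(mid, k)
--         if mid_val == n:
--             return k - mid + 1
--         elif mid_val > n:
--             start = mid + 1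
--         else:
--             end = mid
--     return k - start + 1
-- ===== SOURCE B (Python) =====
-- def sum_upto(num):
--     return (num * (num + 1)) // 2
--
-- def sum_from_to(fromm, to):
--     if fromm <= 1:
--         return sum_upto(to)
--     return sum_upto(to) - sum_upto(fromm)
--
-- def min_splitters(n, k):
--     # Descend from k while the tail sum still fits within n; the last mid that
--     # fit is the smallest one, and the answer counts the positions from it to k.
--     best = k
--     mid = k
--     while mid >= 1 and sum_from_to(mid, k) <= n:
--         best = mid
--         mid -= 1
--     return k - best + 1
-- ===== Notes on version B (the rewrite author's own statement) =====
-- stated objective: simpler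
-- what changed: Replaces the binary search over [1,k] by a short descending scan from k that keeps the last block-start whose tail sum still fits within n (the smallest such start, since the tail sum is strictly decreasing in the start), reusing the same sum helpers; no mid/start/end bookkeeping or equality early-exit. Pre_ restricts to k >= 1, the function's natural domain (at least one block): for k <= 0 A skips its loop and returns k itself (a nonpositive count), which B does not reproduce.
-- outside the precondition, e.g. on min_splitters(5, 0): A returns 0, B returns 1; on min_splitters(5, -2): A returns -2, B returns 1
import Mathlib
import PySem

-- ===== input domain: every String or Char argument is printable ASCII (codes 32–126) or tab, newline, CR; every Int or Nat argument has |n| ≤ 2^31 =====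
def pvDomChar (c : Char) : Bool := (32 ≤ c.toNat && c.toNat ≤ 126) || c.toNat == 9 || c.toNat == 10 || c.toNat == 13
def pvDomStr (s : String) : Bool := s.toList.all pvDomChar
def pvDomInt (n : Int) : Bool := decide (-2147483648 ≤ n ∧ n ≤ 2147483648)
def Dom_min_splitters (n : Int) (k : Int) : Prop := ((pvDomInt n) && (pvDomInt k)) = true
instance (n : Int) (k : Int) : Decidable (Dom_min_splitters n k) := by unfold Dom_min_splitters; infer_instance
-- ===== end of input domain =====

-- B replaces A's binary search by a short descending scan keeping the last fitting block start (simpler bookkeeping, not faster).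

-- ===== PORT A =====
def sum_upto (num : Int) : Int := PySem.Int.floordiv (num * (num + 1)) 2

def sum_from_to (fromm : Int) (to_ : Int) : Int :=
  if fromm ≤ 1 then sum_upto to_
  else sum_upto to_ - sum_upto fromm

-- the while-loop of A over state (start, end)
def msLoop (n : Int) (k : Int) (start : Int) (end_ : Int) : Int :=
  if h : start < end_ then
    let mid := PySem.Int.floordiv (start + end_) 2
    let mid_val := sum_from_to mid k
    if mid_val = n then k - mid + 1
    else if mid_val > n then msLoop n k (mid + 1) end_
    else msLoop n k start mid
  else k - start + 1
termination_by (end_ - start).toNat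
decreasing_by
  · have e : PySem.Int.floordiv (start + end_) 2 = (start + end_) / 2 :=
      PySem.Int.floordiv_eq_ediv_of_pos (by omega)
    simp only [e]; omega
  · have e : PySem.Int.floordiv (start + end_) 2 = (start + end_) / 2 :=
      PySem.Int.floordiv_eq_ediv_of_pos (by omega)
    simp only [e]; omega

def min_splitters (n : Int) (k : Int) : Int := msLoop n k 1 k

-- ===== PORT B =====
-- the while-loop of B over state (best, mid)
def altLoop (n : Int) (k : Int) (best : Int) (mid : Int) : Int :=
  if h : 1 ≤ mid ∧ sum_from_to mid k ≤ n then altLoop n k mid (mid - 1)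
  else best
termination_by mid.toNat
decreasing_by omega

def min_splitters_alt (n : Int) (k : Int) : Int :=
  k - altLoop n k k k + 1

-- ===== PRECONDITION & SPEC =====
-- Pre_ restricts to k ≥ 1, the function's natural domain (at least one block):
-- for k ≤ 0 A skips its loop and returns k itself (a nonpositive count), which B does not reproduce.
def Pre_min_splitters (n : Int) (k : Int) : Prop := 1 ≤ k
instance (n : Int) (k : Int) : Decidable (Pre_min_splitters n k) := by unfold Pre_min_splitters; infer_instance
def pvWitness_min_splitters : Int × Int := (0, 1)

def Spec_min_splitters (n : Int) (k : Int) (out : Int) : Prop := out = min_splitters_alt n k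
instance (n : Int) (k : Int) (out : Int) : Decidable (Spec_min_splitters n k out) := by unfold Spec_min_splitters; infer_instance

-- ===== CLAIM (what is proved, stated in full; the proofs are below) =====
def Claim_equal_min_splitters : Prop := ∀ (n : Int) (k : Int), Dom_min_splitters n k → Pre_min_splitters n k → Spec_min_splitters n k (min_splitters n k)

-- ===== LEMMAS AND PROOFS =====

-- the first j ∈ [lo, hi) with sum_from_to j k ≤ n, else hi (reference point both loops reach)
def gHit (n : Int) (k : Int) (lo : Int) (hi : Int) : Int :=
  if h : lo < hi then
    if sum_from_to lo k ≤ n then lo else gHit n k (lo + 1) hi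
  else hi
termination_by (hi - lo).toNat
decreasing_by omega

lemma two_sum_upto (m : Int) : 2 * sum_upto m = m * (m + 1) := by
  have hdvd : (2:Int) ∣ m * (m + 1) := (Int.even_mul_succ_self m).two_dvd
  unfold sum_upto
  rw [PySem.Int.floordiv_eq_ediv_of_pos (by norm_num)]
  omega

lemma sum_upto_lt (a b : Int) (h0 : 0 ≤ a) (hab : a < b) : sum_upto a < sum_upto b := by
  have ha := two_sum_upto a
  have hb := two_sum_upto b
  nlinarith

lemma sft_anti (k a b : Int) (h1 : 1 ≤ a) (hab : a < b) (_hbk : b ≤ k) :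
    sum_from_to b k < sum_from_to a k := by
  have hb1 : ¬ b ≤ 1 := by omega
  have hSb : 0 < sum_upto b := by
    have := two_sum_upto b; nlinarith
  by_cases ha : a ≤ 1
  · simp only [sum_from_to, if_pos ha, if_neg hb1]
    linarith
  · have hS : sum_upto a < sum_upto b := sum_upto_lt a b (by omega) hab
    simp only [sum_from_to, if_neg ha, if_neg hb1]
    linarith

lemma gHit_locate (n k lo hi m : Int) (h1 : lo ≤ m) (h2 : m ≤ hi)
    (hm : sum_from_to m k ≤ n) (hbefore : ∀ j, lo ≤ j → j < m → ¬ sum_from_to j k ≤ n) :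
    gHit n k lo hi = m := by
  obtain ⟨d, hd⟩ : ∃ d : Nat, (m - lo).toNat = d := ⟨_, rfl⟩
  induction d generalizing lo with
  | zero =>
    have hlo : m = lo := by omega
    subst hlo
    rw [gHit]
    by_cases h : m < hi
    · rw [dif_pos h, if_pos hm]
    · rw [dif_neg h]; omega
  | succ d ih =>
    have hlom : lo < m := by omega
    rw [gHit, dif_pos (by omega : lo < hi), if_neg (hbefore lo le_rfl hlom)]
    exact ih (lo + 1) (by omega) (fun j hj hjm => hbefore j (by omega) hjm) (by omega)

lemma gHit_skip (n k lo lo' hi : Int) (h1 : lo ≤ lo') (h2 : lo' ≤ hi)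
    (hbefore : ∀ j, lo ≤ j → j < lo' → ¬ sum_from_to j k ≤ n) :
    gHit n k lo hi = gHit n k lo' hi := by
  obtain ⟨d, hd⟩ : ∃ d : Nat, (lo' - lo).toNat = d := ⟨_, rfl⟩
  induction d generalizing lo with
  | zero =>
    have hlo : lo' = lo := by omega
    rw [hlo]
  | succ d ih =>
    have hlt : lo < lo' := by omega
    rw [gHit, dif_pos (by omega : lo < hi), if_neg (hbefore lo le_rfl hlt)]
    exact ih (lo + 1) (by omega) (fun j hj hjm => hbefore j (by omega) hjm) (by omega)

lemma gHit_trunc (n k lo m hi : Int) (h1 : lo ≤ m) (h2 : m ≤ hi)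
    (hm : sum_from_to m k ≤ n) : gHit n k lo hi = gHit n k lo m := by
  obtain ⟨d, hd⟩ : ∃ d : Nat, (m - lo).toNat = d := ⟨_, rfl⟩
  induction d generalizing lo with
  | zero =>
    have hlo : m = lo := by omega
    subst hlo
    rw [gHit]
    by_cases h : m < hi
    · rw [dif_pos h, if_pos hm, gHit, dif_neg (lt_irrefl m)]
    · rw [dif_neg h, gHit, dif_neg (lt_irrefl m)]; omega
  | succ d ih =>
    have hlom : lo < m := by omega
    by_cases hp : sum_from_to lo k ≤ n
    · rw [gHit, dif_pos (by omega : lo < hi), if_pos hp]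
      rw [gHit, dif_pos (by omega : lo < m), if_pos hp]
    · conv_lhs => rw [gHit]
      conv_rhs => rw [gHit]
      rw [dif_pos (by omega : lo < hi), dif_pos (by omega : lo < m), if_neg hp, if_neg hp]
      exact ih (lo + 1) (by omega) (by omega)

lemma msLoop_eq (n k : Int) :
    ∀ (d : Nat) (start end_ : Int), (end_ - start).toNat = d →
      1 ≤ start → start ≤ end_ → end_ ≤ k →
      msLoop n k start end_ = k - gHit n k start end_ + 1 := by
  intro d
  induction d using Nat.strong_induction_on with
  | _ d ih =>
  intro start end_ hd h1 h2 h3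
  rw [msLoop]
  by_cases h : start < end_
  · rw [dif_pos h]
    have emid : PySem.Int.floordiv (start + end_) 2 = (start + end_) / 2 :=
      PySem.Int.floordiv_eq_ediv_of_pos (by norm_num)
    simp only [emid]
    set mid := (start + end_) / 2 with hmid
    have hb1 : start ≤ mid := by omega
    have hb2 : mid < end_ := by omega
    by_cases he : sum_from_to mid k = n
    · rw [if_pos he]
      have hg : gHit n k start end_ = mid :=
        gHit_locate n k start end_ mid hb1 (by omega) (le_of_eq he)
          (fun j hj hjm => by
            have := sft_anti k j mid (by omega) hjm (by omega)
            intro hle; omega)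
      rw [hg]
    · rw [if_neg he]
      by_cases hg : sum_from_to mid k > n
      · rw [if_pos hg]
        have hrec := ih (end_ - (mid + 1)).toNat (by omega) (mid + 1) end_ rfl
          (by omega) (by omega) h3
        rw [hrec]
        rw [gHit_skip n k start (mid + 1) end_ (by omega) (by omega)
          (fun j hj hjm => by
            intro hle
            by_cases hjm' : j = mid
            · subst hjm'; omega
            · have := sft_anti k j mid (by omega) (by omega) (by omega)
              omega)]
      · rw [if_neg hg]
        have hPmid : sum_from_to mid k ≤ n := by omega
        have hrec := ih (mid - start).toNat (by omega) start mid rfl h1 (by omega)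
          (by omega)
        rw [hrec, gHit_trunc n k start mid end_ (by omega) (by omega) hPmid]
  · rw [dif_neg h]
    rw [gHit, dif_neg h]
    omega

lemma altLoop_eq (n k : Int) (hk : 1 ≤ k) :
    ∀ (d : Nat) (m best : Int), m.toNat = d →
      0 ≤ m → m ≤ k → (∀ j, m < j → j ≤ k → sum_from_to j k ≤ n) →
      best = (if m < k then m + 1 else k) →
      altLoop n k best m = gHit n k 1 k := by
  intro d
  induction d with
  | zero =>
    intro m best hd h0 hk2 hall hbest
    have hm0 : m = 0 := by omega
    subst hm0
    rw [altLoop, dif_neg (by rintro ⟨hc, -⟩; omega)]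
    have hg : gHit n k 1 k = 1 :=
      gHit_locate n k 1 k 1 le_rfl hk (hall 1 (by omega) hk)
        (fun j hj hjm => by omega)
    rw [hg, hbest, if_pos (by omega)]
    omega
  | succ d ih =>
    intro m best hd h0 hk2 hall hbest
    have hm1 : 1 ≤ m := by omega
    rw [altLoop]
    by_cases hp : sum_from_to m k ≤ n
    · rw [dif_pos ⟨hm1, hp⟩]
      exact ih (m - 1) m (by omega) (by omega) (by omega)
        (fun j hj hjk => by
          by_cases hjm : j = m
          · subst hjm; exact hp
          · exact hall j (by omega) hjk)
        (by rw [if_pos (by omega)]; omega)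
    · rw [dif_neg (by rintro ⟨-, hc⟩; exact hp hc)]
      have hnone : ∀ j, 1 ≤ j → j < m + 1 → ¬ sum_from_to j k ≤ n := by
        intro j hj hjm hle
        by_cases hjm' : j = m
        · subst hjm'; exact hp hle
        · have := sft_anti k j m (by omega) (by omega) (by omega)
          omega
      by_cases hmk : m < k
      · have hg : gHit n k 1 k = m + 1 :=
          gHit_locate n k 1 k (m + 1) (by omega) (by omega)
            (hall (m + 1) (by omega) (by omega)) hnone
        rw [hg, hbest, if_pos hmk]
      · have hmk' : m = k := by omega
        have hg : gHit n k 1 k = k := by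
          rw [gHit_skip n k 1 k k (by omega) le_rfl
            (fun j hj hjm => hnone j hj (by omega))]
          rw [gHit, dif_neg (lt_irrefl k)]
        rw [hg, hbest, if_neg (by omega)]

-- ===== VERDICT (by name: the statement is the Claim_ definition above) =====
theorem min_splitters_spec : Claim_equal_min_splitters := by
  intro n k _ hpre
  have hk : 1 ≤ k := hpre
  unfold Spec_min_splitters min_splitters min_splitters_alt
  have hA := msLoop_eq n k (k - 1).toNat 1 k (by omega) le_rfl hk le_rfl
  have hB := altLoop_eq n k hk k.toNat k k rfl (by omega) le_rfl
      (by intro j hj hjk; exact ((by omega : False).elim)) (by simp)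
  rw [hA, hB]
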